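-- pv_equiv track=rewrite | github.com/Leibniz23/MaratonaIC | MC521/24-05/probJ.py | dfs
-- ===== SOURCE A (Python) =====
-- def dfs_visit(g, color, v, t, n, resp):
--     if v == t:
--          resp[0] = "happy"
--          return
--     color[v] = 1
--     for i in range(1, n):
--         u = g[v][i]
--         if color[i] == 0 and u <= 1000:
--             dfs_visit(g, color, i, t, n, resp)
--             if resp[0] == "happy":
--                  return
--     color[v] = 2
--
-- def dfs(g):
--     n = len(g)
--     color = []
--     for i in range(n):
--         color.append(0)
--     color.append(0)
--     resp = ["sad"]
--     for i in range(1, n):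
--         if resp[0] == "happy":
--             break
--         if g[0][i] <= 1000:
--             dfs_visit(g, color, i, len(g)-1, n, resp)
--
--         for i in range(1, n):
--             color[i] = 0
--
--     return resp
-- ===== SOURCE B (Python) =====
-- def dfs(g):
--     n = len(g)
--     reached = {0}
--     frontier = {0}
--     for _ in range(n):
--         if not frontier:
--             break
--         nxt = {i for i in range(1, n)
--                if i not in reached and any(g[v][i] <= 1000 for v in frontier)}
--         reached |= nxt
--         frontier = nxt
--     return ["happy" if n >= 2 and (n - 1) in reached else "sad"]
-- ===== Notes on version B (the rewrite author's own statement) =====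
-- stated objective: faster
-- what changed: A restarts a fresh recursive coloring DFS (with a full color reset) from every candidate start vertex; B runs one frontier-by-frontier BFS saturation from vertex 0, scanning each vertex's row only while it is in the frontier.
-- outside the precondition, e.g. on dfs([[0, 2000], [5]]): A returns ['sad'], B returns ['sad']; on dfs([[0, 2000, 0], [], [2000, 2000, 2000, 0], [0]]): A returns ['happy'], B raises IndexError
import Mathlib
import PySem

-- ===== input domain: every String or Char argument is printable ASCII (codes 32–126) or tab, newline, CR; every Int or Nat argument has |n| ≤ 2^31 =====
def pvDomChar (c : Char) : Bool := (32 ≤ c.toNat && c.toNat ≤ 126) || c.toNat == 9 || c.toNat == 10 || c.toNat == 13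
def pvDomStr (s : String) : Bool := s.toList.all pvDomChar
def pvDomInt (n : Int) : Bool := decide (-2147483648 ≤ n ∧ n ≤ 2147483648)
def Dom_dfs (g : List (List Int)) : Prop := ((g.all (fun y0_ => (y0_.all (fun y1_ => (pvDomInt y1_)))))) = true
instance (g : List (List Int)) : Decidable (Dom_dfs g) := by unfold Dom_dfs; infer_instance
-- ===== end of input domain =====

-- B replaces A's restarted recursive DFS (a fresh full DFS per candidate start vertex)
-- by a single frontier-by-frontier BFS from vertex 0; return value only (neither mutates g).

-- ===== PORT A =====
-- g[v][i]: matrix read; under Pre_dfs (rows at least len(g) long) every read is in range,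
-- so getD is exact here.
def pvW (g : List (List Int)) (v i : Nat) : Int := (g.getD v []).getD i 0

-- dfs_visit, with the shared mutable `color`/`resp` threaded as state and Python's
-- unbounded recursion driven by a fuel counter (n+2 fuel always suffices: every nested
-- call is made on a white vertex, so the depth is bounded by the number of zeros).
mutual
def visitA (g : List (List Int)) (n t : Nat) : Nat → List Int → Nat → String → List Int × String
  | 0, c, _, r => (c, r)
  | f + 1, c, v, r =>
    if v = t then (c, "happy")
    else loopA g n t f (c.set v 1) v (List.range' 1 (n - 1)) r
  termination_by f _ _ _ => (f, 0)
def loopA (g : List (List Int)) (n t : Nat) : Nat → List Int → Nat → List Nat → String → List Int × String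
  | _, c, v, [], r => (c.set v 2, r)
  | f, c, v, i :: rest, r =>
    if c.getD i 1 = 0 ∧ pvW g v i ≤ 1000 then
      let p := visitA g n t f c i r
      if p.2 = "happy" then p else loopA g n t f p.1 v rest p.2
    else loopA g n t f c v rest r
  termination_by f _ _ is _ => (f, is.length + 1)
end

-- the outer loop of dfs: try each start i in range(1, n), resetting color[1..n-1] after
def outerA (g : List (List Int)) (n : Nat) : List Nat → List Int → String → String
  | [], _, r => r
  | i :: rest, c, r =>
    if r = "happy" then r
    else
      let p := if pvW g 0 i ≤ 1000 then visitA g n (n - 1) (n + 2) c i r else (c, r)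
      let c2 := (List.range' 1 (n - 1)).foldl (fun cc j => cc.set j (0 : Int)) p.1
      outerA g n rest c2 p.2

def dfs (g : List (List Int)) : List String :=
  let n := g.length
  let color := ((List.range n).foldl (fun acc _ => acc ++ [(0 : Int)]) []) ++ [(0 : Int)]
  [outerA g n (List.range' 1 (n - 1)) color "sad"]

-- ===== PORT B =====
-- nxt = {i for i in range(1, n) if i not in reached and any(g[v][i] <= 1000 for v in frontier)}
-- (`any` over a set is order-insensitive, so iterating the frontier list is exact)
def stepB (g : List (List Int)) (n : Nat) (reached frontier : PySem.Set Nat) : PySem.Set Nat :=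
  PySem.Set.ofList ((List.range' 1 (n - 1)).filter
    (fun i => !(PySem.Set.contains reached i) && frontier.any (fun v => pvW g v i ≤ 1000)))

-- the bounded BFS loop, stopping early on an empty frontier (Python's break)
def bLoop (g : List (List Int)) (n : Nat) :
    Nat → PySem.Set Nat × PySem.Set Nat → PySem.Set Nat × PySem.Set Nat
  | 0, s => s
  | k + 1, s =>
    if s.2 = [] then s
    else
      let nxt := stepB g n s.1 s.2
      bLoop g n k (PySem.Set.union s.1 nxt, nxt)

def dfs_alt (g : List (List Int)) : List String :=
  let n := g.length
  let fin := bLoop g n n (PySem.Set.ofList [0], PySem.Set.ofList [0])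
  [if 2 ≤ n ∧ PySem.Set.contains fin.1 (n - 1) then "happy" else "sad"]

-- ===== PRECONDITION & SPEC =====
-- Pre_ requires each row to be at least as long as the matrix: A reads g[v][i] for i up to
-- len(g)-1 on every row v its search visits and raises IndexError on a short visited row;
-- which rows are visited depends on the search, so the natural (square-or-wider) domain is
-- required, and on some ragged inputs whose short rows stay unvisited A still returns.
def Pre_dfs (g : List (List Int)) : Prop := ∀ row ∈ g, g.length ≤ row.length
instance (g : List (List Int)) : Decidable (Pre_dfs g) := by unfold Pre_dfs; infer_instance
def pvWitness_dfs : List (List Int) := [[0, 0], [0, 0]]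

def Spec_dfs (g : List (List Int)) (out : List String) : Prop := out = dfs_alt g
instance (g : List (List Int)) (out : List String) : Decidable (Spec_dfs g out) := by unfold Spec_dfs; infer_instance

-- ===== CLAIM (what is proved, stated in full; the proofs are below) =====
def Claim_equal_dfs : Prop := ∀ (g : List (List Int)), Dom_dfs g → Pre_dfs g → Spec_dfs g (dfs g)

-- ===== LEMMAS AND PROOFS =====

-- edges of weight ≤ 1000 into a column index 1..n-1, and reachability along them
def Edg (g : List (List Int)) (n v i : Nat) : Prop := 1 ≤ i ∧ i < n ∧ pvW g v i ≤ 1000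

inductive Rch (g : List (List Int)) (n : Nat) : Nat → Nat → Prop
  | refl (v : Nat) : Rch g n v v
  | step {v i u : Nat} : Edg g n v i → Rch g n i u → Rch g n v u

def Happy (g : List (List Int)) : Prop :=
  ∃ s, Edg g g.length 0 s ∧ Rch g g.length s (g.length - 1)

theorem rch_snoc {g : List (List Int)} {n p v u : Nat}
    (h : Rch g n p v) (e : Edg g n v u) : Rch g n p u := by
  induction h with
  | refl => exact Rch.step e (Rch.refl u)
  | step e' _ ih => exact Rch.step e' (ih e)

-- getD/set helpers
theorem wset_ne {cl : List Int} {v j : Nat} (x : Int) (h : j ≠ v) :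
    (cl.set v x).getD j 1 = cl.getD j 1 := by
  simp [List.getD_eq_getElem?_getD, List.getElem?_set_ne (Ne.symm h)]

theorem wset_nonzero {cl : List Int} {v j : Nat} {x : Int} (hx : x ≠ 0) :
    (cl.set v x).getD j 1 = 0 → cl.getD j 1 = 0 := by
  intro h
  by_cases hj : j = v
  · subst hj
    by_cases hv : j < cl.length
    · simp [List.getD_eq_getElem?_getD, List.getElem?_set_self hv] at h; exact absurd h hx
    · rwa [List.set_eq_of_length_le (by omega)] at h
  · rwa [wset_ne x hj] at h

theorem pvGetSome {cl : List Int} {j : Nat} (h : j < cl.length) (hw : cl.getD j 1 = 0) :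
    (cl[j]?) = some 0 := by
  cases hcv : cl[j]? with
  | none => rw [List.getElem?_eq_none_iff] at hcv; omega
  | some a =>
    rw [List.getD_eq_getElem?_getD, hcv] at hw
    simp at hw; simp [hw]

theorem cw_pos {cl : List Int} {v : Nat} (hv : v < cl.length) (hw : cl.getD v 1 = 0) :
    0 < cl.countP (fun x => x == 0) := by
  rw [List.countP_pos_iff]
  refine ⟨0, ?_, by simp⟩
  rw [List.mem_iff_getElem?]
  exact ⟨v, pvGetSome hv hw⟩

theorem cw_set_one : ∀ (cl : List Int) (v : Nat), v < cl.length → cl.getD v 1 = 0 →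
    (cl.set v 1).countP (fun x => x == 0) + 1 = cl.countP (fun x => x == 0) := by
  intro cl
  induction cl with
  | nil => intro v hv hw; simp at hv
  | cons a tl ih =>
    intro v hv hw
    cases v with
    | zero =>
      simp only [List.getD, List.getElem?_cons_zero, Option.getD_some] at hw
      simp [List.set_cons_zero, hw]
    | succ v =>
      have hv' : v < tl.length := by simpa using hv
      have hw' : tl.getD v 1 = 0 := by simpa [List.getD] using hw
      simp only [List.set_cons_succ, List.countP_cons]
      have := ih v hv' hw'
      omega

theorem cw_mono : ∀ (cl' cl : List Int), cl'.length = cl.length →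
    (∀ j, cl'.getD j 1 = 0 → cl.getD j 1 = 0) →
    cl'.countP (fun x => x == 0) ≤ cl.countP (fun x => x == 0) := by
  intro cl'
  induction cl' with
  | nil => intro cl _ _; simp
  | cons a' tl' ih =>
    intro cl hlen hw
    cases cl with
    | nil => simp at hlen
    | cons a tl =>
      have h0 : a' = 0 → a = 0 := by
        intro h; have := hw 0 (by simpa [List.getD] using h); simpa [List.getD] using this
      have htl := ih tl (by simpa using hlen) (fun j hj => by
        have := hw (j+1) (by simpa [List.getD] using hj); simpa [List.getD] using this)
      simp only [List.countP_cons]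
      by_cases ha' : a' = 0
      · simp [ha', h0 ha']; omega
      · have : (a' == 0) = false := by simpa using ha'
        simp [this]; split <;> omega

-- unfolding equations in if-form
theorem visitA_zero (g : List (List Int)) (n t : Nat) (cl : List Int) (v : Nat) (r : String) :
    visitA g n t 0 cl v r = (cl, r) := by rw [visitA]

theorem visitA_succ (g : List (List Int)) (n t f : Nat) (cl : List Int) (v : Nat) (r : String) :
    visitA g n t (f + 1) cl v r =
      if v = t then (cl, "happy")
      else loopA g n t f (cl.set v 1) v (List.range' 1 (n - 1)) r := by rw [visitA]

theorem loopA_nil (g : List (List Int)) (n t f : Nat) (cl : List Int) (v : Nat) (r : String) :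
    loopA g n t f cl v [] r = (cl.set v 2, r) := by rw [loopA]

theorem loopA_cons (g : List (List Int)) (n t f : Nat) (cl : List Int) (v i : Nat)
    (rest : List Nat) (r : String) :
    loopA g n t f cl v (i :: rest) r =
      if cl.getD i 1 = 0 ∧ pvW g v i ≤ 1000 then
        (if (visitA g n t f cl i r).2 = "happy" then visitA g n t f cl i r
         else loopA g n t f (visitA g n t f cl i r).1 v rest (visitA g n t f cl i r).2)
      else loopA g n t f cl v rest r := by rw [loopA]

-- length preservation
theorem lLen_aux (g : List (List Int)) (n t f : Nat)
    (hV : ∀ cl v r, (visitA g n t f cl v r).1.length = cl.length) :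
    ∀ is cl v r, (loopA g n t f cl v is r).1.length = cl.length := by
  intro is
  induction is with
  | nil => intro cl v r; simp [loopA]
  | cons i rest ih =>
    intro cl v r
    rw [loopA_cons]
    split
    · split
      · exact hV cl i r
      · rw [ih]; exact hV cl i r
    · exact ih cl v r

theorem vLen (g : List (List Int)) (n t : Nat) :
    ∀ f cl v r, (visitA g n t f cl v r).1.length = cl.length := by
  intro f
  induction f with
  | zero => intro cl v r; simp [visitA]
  | succ f ih =>
    intro cl v r
    rw [visitA]
    split
    · rfl
    · rw [lLen_aux g n t f ih]; simp

-- only nonzero values are ever written: whiteness can only shrink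
theorem lMono_aux (g : List (List Int)) (n t f : Nat)
    (hV : ∀ cl v r j, ((visitA g n t f cl v r).1).getD j 1 = 0 → cl.getD j 1 = 0) :
    ∀ is cl v r j, ((loopA g n t f cl v is r).1).getD j 1 = 0 → cl.getD j 1 = 0 := by
  intro is
  induction is with
  | nil =>
    intro cl v r j h
    rw [loopA_nil] at h
    exact wset_nonzero (by norm_num) h
  | cons i rest ih =>
    intro cl v r j
    rw [loopA_cons]
    split
    · split
      · exact hV cl i r j
      · intro h; exact hV cl i r j (ih _ _ _ _ h)
    · exact ih cl v r j

theorem vMono (g : List (List Int)) (n t : Nat) :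
    ∀ f cl v r j, ((visitA g n t f cl v r).1).getD j 1 = 0 → cl.getD j 1 = 0 := by
  intro f
  induction f with
  | zero => intro cl v r j; rw [visitA_zero]; exact fun h => h
  | succ f ih =>
    intro cl v r j
    rw [visitA_succ]
    split
    · exact fun h => h
    · intro h
      exact wset_nonzero (by norm_num) (lMono_aux g n t f ih _ _ _ _ _ h)

theorem lMono (g : List (List Int)) (n t f : Nat) :
    ∀ cl v is r j, ((loopA g n t f cl v is r).1).getD j 1 = 0 → cl.getD j 1 = 0 :=
  fun cl v is r j => lMono_aux g n t f (vMono g n t f) is cl v r j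

-- indices outside 1..n-1, and the target t, are never written
theorem lOut_aux (g : List (List Int)) (n t f : Nat)
    (hV : ∀ cl v r, 1 ≤ v → v < n → ∀ j, (¬(1 ≤ j ∧ j < n) ∨ j = t) →
      ((visitA g n t f cl v r).1)[j]? = cl[j]?) :
    ∀ is cl v r, 1 ≤ v → v < n → v ≠ t → (∀ i ∈ is, 1 ≤ i ∧ i < n) →
      ∀ j, (¬(1 ≤ j ∧ j < n) ∨ j = t) → ((loopA g n t f cl v is r).1)[j]? = cl[j]? := by
  intro is
  induction is with
  | nil =>
    intro cl v r hv1 hv2 hvt _ j hj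
    rw [loopA_nil]
    refine List.getElem?_set_ne ?_
    rcases hj with hj | hj
    · omega
    · omega
  | cons i rest ih =>
    intro cl v r hv1 hv2 hvt hb j hj
    have hib := hb i (by simp)
    have hbr : ∀ i' ∈ rest, 1 ≤ i' ∧ i' < n := fun i' hi' => hb i' (by simp [hi'])
    rw [loopA_cons]
    split
    · split
      · exact hV cl i r hib.1 hib.2 j hj
      · rw [ih _ _ _ hv1 hv2 hvt hbr j hj]
        exact hV cl i r hib.1 hib.2 j hj
    · exact ih cl v r hv1 hv2 hvt hbr j hj

theorem vOut (g : List (List Int)) (n t : Nat) :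
    ∀ f cl v r, 1 ≤ v → v < n → ∀ j, (¬(1 ≤ j ∧ j < n) ∨ j = t) →
      ((visitA g n t f cl v r).1)[j]? = cl[j]? := by
  intro f
  induction f with
  | zero => intro cl v r _ _ j _; rw [visitA_zero]
  | succ f ih =>
    intro cl v r hv1 hv2 j hj
    rw [visitA_succ]
    split
    · rfl
    · rename_i hvt
      rw [lOut_aux g n t f ih _ _ _ _ hv1 hv2 hvt
        (fun i hi => by rw [List.mem_range'_1] at hi; omega) j hj]
      refine List.getElem?_set_ne ?_
      rcases hj with hj' | hj' <;> omega

-- the resp value is either "happy" or the incoming one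
theorem lResp_aux (g : List (List Int)) (n t f : Nat)
    (hV : ∀ cl v r, (visitA g n t f cl v r).2 = "happy" ∨ (visitA g n t f cl v r).2 = r) :
    ∀ is cl v r, (loopA g n t f cl v is r).2 = "happy" ∨ (loopA g n t f cl v is r).2 = r := by
  intro is
  induction is with
  | nil => intro cl v r; rw [loopA_nil]; right; rfl
  | cons i rest ih =>
    intro cl v r
    rw [loopA_cons]
    split
    · split
      · rename_i hp; left; exact hp
      · rename_i hp
        rcases ih (visitA g n t f cl i r).1 v (visitA g n t f cl i r).2 with h | h
        · left; exact h
        · rcases hV cl i r with h2 | h2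
          · exact absurd h2 hp
          · right; rw [h, h2]
    · exact ih cl v r

theorem vResp (g : List (List Int)) (n t : Nat) :
    ∀ f cl v r, (visitA g n t f cl v r).2 = "happy" ∨ (visitA g n t f cl v r).2 = r := by
  intro f
  induction f with
  | zero => intro cl v r; rw [visitA_zero]; right; rfl
  | succ f ih =>
    intro cl v r
    rw [visitA_succ]
    split
    · left; rfl
    · exact lResp_aux g n t f ih _ _ _ r

-- soundness: a "happy" answer exhibits reachability
theorem lSound_aux (g : List (List Int)) (n t f : Nat)
    (hV : ∀ cl v r, (visitA g n t f cl v r).2 = "happy" → r = "happy" ∨ Rch g n v t) :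
    ∀ is cl v r, (∀ i ∈ is, 1 ≤ i ∧ i < n) → (loopA g n t f cl v is r).2 = "happy" →
      r = "happy" ∨ ∃ i ∈ is, Edg g n v i ∧ Rch g n i t := by
  intro is
  induction is with
  | nil => intro cl v r _ h; rw [loopA_nil] at h; left; exact h
  | cons i rest ih =>
    intro cl v r hb
    have hib := hb i (by simp)
    have hbr : ∀ i' ∈ rest, 1 ≤ i' ∧ i' < n := fun i' hi' => hb i' (by simp [hi'])
    rw [loopA_cons]
    split
    · rename_i hcond
      split
      · rename_i hp
        intro _
        rcases hV cl i r hp with h | h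
        · left; exact h
        · right; exact ⟨i, by simp, ⟨hib.1, hib.2, hcond.2⟩, h⟩
      · rename_i hp
        intro h
        rcases ih _ _ _ hbr h with h2 | h2
        · rcases hV cl i r h2 with h3 | h3
          · left; exact h3
          · right; exact ⟨i, by simp, ⟨hib.1, hib.2, hcond.2⟩, h3⟩
        · right
          obtain ⟨i', hi', he, hr⟩ := h2
          exact ⟨i', by simp [hi'], he, hr⟩
    · intro h
      rcases ih _ _ _ hbr h with h2 | h2
      · left; exact h2
      · right
        obtain ⟨i', hi', he, hr⟩ := h2
        exact ⟨i', by simp [hi'], he, hr⟩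

theorem vSound (g : List (List Int)) (n t : Nat) :
    ∀ f cl v r, (visitA g n t f cl v r).2 = "happy" → r = "happy" ∨ Rch g n v t := by
  intro f
  induction f with
  | zero => intro cl v r h; rw [visitA_zero] at h; left; exact h
  | succ f ih =>
    intro cl v r
    rw [visitA_succ]
    split
    · rename_i hvt; intro _; right; subst hvt; exact Rch.refl v
    · intro h
      rcases lSound_aux g n t f ih _ _ _ _
        (fun i hi => by rw [List.mem_range'_1] at hi; omega) h with h2 | h2
      · left; exact h2
      · right
        obtain ⟨i, _, he, hr⟩ := h2
        exact Rch.step he hr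

-- completeness invariant: on a sad run from a white vertex, the newly coloured
-- vertices (including the start) are closed under low-weight edges
def VC (g : List (List Int)) (n t f : Nat) : Prop :=
  ∀ cl v r, cl.countP (fun x => x == 0) ≤ f → cl.getD v 1 = 0 → v < n → cl.length = n + 1 →
    (visitA g n t f cl v r).2 ≠ "happy" →
    ((visitA g n t f cl v r).1.getD v 1 ≠ 0) ∧
    (∀ u i, u < n → (visitA g n t f cl v r).1.getD u 1 ≠ 0 → cl.getD u 1 = 0 →
      1 ≤ i → i < n → pvW g u i ≤ 1000 → (visitA g n t f cl v r).1.getD i 1 ≠ 0)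

theorem wset_self {cl : List Int} {v : Nat} (hv : v < cl.length) (x : Int) :
    (cl.set v x).getD v 1 = x := by
  simp [List.getD_eq_getElem?_getD, List.getElem?_set_self hv]

theorem lComp_aux (g : List (List Int)) (n t f : Nat) (hV : VC g n t f) :
    ∀ is cl v r, cl.countP (fun x => x == 0) ≤ f → cl.getD v 1 ≠ 0 → cl.length = n + 1 →
      (∀ i ∈ is, 1 ≤ i ∧ i < n) →
      (loopA g n t f cl v is r).2 ≠ "happy" →
      (∀ i ∈ is, pvW g v i ≤ 1000 → (loopA g n t f cl v is r).1.getD i 1 ≠ 0) ∧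
      (∀ u i, u < n → (loopA g n t f cl v is r).1.getD u 1 ≠ 0 → cl.getD u 1 = 0 →
        1 ≤ i → i < n → pvW g u i ≤ 1000 → (loopA g n t f cl v is r).1.getD i 1 ≠ 0) := by
  intro is
  induction is with
  | nil =>
    intro cl v r hcw hnv hlen hb hne
    rw [loopA_nil]
    constructor
    · intro j hj; simp at hj
    · intro u i hu hnw hw h1 h2 hwt
      by_cases huv : u = v
      · subst huv; exact absurd hw hnv
      · rw [wset_ne 2 huv] at hnw; exact absurd hw hnw
  | cons i rest ih =>
    intro cl v r hcw hnv hlen hb hne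
    have hib := hb i (by simp)
    have hbr : ∀ i' ∈ rest, 1 ≤ i' ∧ i' < n := fun i' hi' => hb i' (by simp [hi'])
    by_cases hcond : (cl.getD i 1 = 0 ∧ pvW g v i ≤ 1000)
    · by_cases hp : (visitA g n t f cl i r).2 = "happy"
      · have heq : loopA g n t f cl v (i :: rest) r = visitA g n t f cl i r := by
          rw [loopA_cons, if_pos hcond, if_pos hp]
        rw [heq] at hne
        exact absurd hp hne
      · have heq : loopA g n t f cl v (i :: rest) r =
            loopA g n t f (visitA g n t f cl i r).1 v rest (visitA g n t f cl i r).2 := by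
          rw [loopA_cons, if_pos hcond, if_neg hp]
        rw [heq] at hne ⊢
        obtain ⟨pa, pb⟩ := hV cl i r hcw hcond.1 hib.2 hlen hp
        have hlenp : (visitA g n t f cl i r).1.length = n + 1 := by rw [vLen]; exact hlen
        have hcwp : (visitA g n t f cl i r).1.countP (fun x => x == 0) ≤ f :=
          le_trans (cw_mono _ cl (by rw [vLen]) (fun j => vMono g n t f cl i r j)) hcw
        have hnvp : (visitA g n t f cl i r).1.getD v 1 ≠ 0 :=
          fun h => hnv (vMono g n t f cl i r v h)
        obtain ⟨ra, rb⟩ := ih (visitA g n t f cl i r).1 v (visitA g n t f cl i r).2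
          hcwp hnvp hlenp hbr hne
        constructor
        · intro j hj hwt
          rcases List.mem_cons.mp hj with hj | hj
          · subst hj
            exact fun h => pa (lMono g n t f _ v rest _ j h)
          · exact ra j hj hwt
        · intro u i' hu hnw hw h1 h2 hwt
          by_cases hpu : (visitA g n t f cl i r).1.getD u 1 = 0
          · exact rb u i' hu hnw hpu h1 h2 hwt
          · have := pb u i' hu hpu hw h1 h2 hwt
            exact fun h => this (lMono g n t f _ v rest _ i' h)
    · have heq : loopA g n t f cl v (i :: rest) r = loopA g n t f cl v rest r := by
        rw [loopA_cons, if_neg hcond]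
      rw [heq] at hne ⊢
      obtain ⟨ra, rb⟩ := ih cl v r hcw hnv hlen hbr hne
      constructor
      · intro j hj hwt
        rcases List.mem_cons.mp hj with hj | hj
        · subst hj
          have hni : cl.getD j 1 ≠ 0 := fun h => hcond ⟨h, hwt⟩
          exact fun h => hni (lMono g n t f cl v rest r j h)
        · exact ra j hj hwt
      · exact rb

theorem vComp (g : List (List Int)) (n t : Nat) : ∀ f, VC g n t f := by
  intro f
  induction f with
  | zero =>
    intro cl v r hcw hw hvn hlen _
    exact absurd (cw_pos (by omega) hw) (by omega)
  | succ f ih =>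
    intro cl v r hcw hw hvn hlen hne
    by_cases hvt : v = t
    · have : (visitA g n t (f+1) cl v r).2 = "happy" := by
        rw [visitA_succ, if_pos hvt]
      exact absurd this hne
    · have heq : visitA g n t (f+1) cl v r =
          loopA g n t f (cl.set v 1) v (List.range' 1 (n-1)) r := by
        rw [visitA_succ, if_neg hvt]
      rw [heq] at hne ⊢
      have hvl : v < cl.length := by omega
      have hcw1 : (cl.set v 1).countP (fun x => x == 0) ≤ f := by
        have := cw_set_one cl v hvl hw; omega
      have hnv1 : (cl.set v 1).getD v 1 ≠ 0 := by rw [wset_self hvl]; norm_num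
      obtain ⟨la, lb⟩ := lComp_aux g n t f ih (List.range' 1 (n-1)) (cl.set v 1) v r
        hcw1 hnv1 (by simpa using hlen)
        (fun i hi => by rw [List.mem_range'_1] at hi; omega) hne
      constructor
      · intro h
        exact hnv1 (lMono g n t f _ v _ r v h)
      · intro u i hu hnw hwu h1 h2 hwt
        by_cases huv : u = v
        · subst huv
          exact la i (by rw [List.mem_range'_1]; omega) hwt
        · have hwu1 : (cl.set v 1).getD u 1 = 0 := by rw [wset_ne 1 huv]; exact hwu
          exact lb u i hu hnw hwu1 h1 h2 hwt

-- all-white initial colour list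
theorem wrep {m j : Nat} (h : j < m) : (List.replicate m (0:Int)).getD j 1 = 0 := by
  simp [List.getD_eq_getElem?_getD, h]

theorem cw_replicate : ∀ m : Nat, (List.replicate m (0:Int)).countP (fun x => x == 0) = m := by
  intro m
  induction m with
  | zero => simp
  | succ m ih => simp [List.replicate_succ, ih]

-- one full (not early-broken) dfs_visit from a white start decides reachability
theorem visit_top (g : List (List Int)) (n : Nat) (hn2 : 2 ≤ n) (s : Nat)
    (hs1 : 1 ≤ s) (hs2 : s < n) :
    ((visitA g n (n-1) (n+2) (List.replicate (n+1) 0) s "sad").2 = "happy") ↔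
      Rch g n s (n-1) := by
  constructor
  · intro h
    rcases vSound g n (n-1) (n+2) _ s "sad" h with h' | h'
    · simp at h'
    · exact h'
  · intro hr
    by_contra hne
    obtain ⟨ha, hb⟩ := vComp g n (n-1) (n+2) (List.replicate (n+1) 0) s "sad"
      (by rw [cw_replicate]; omega) (wrep (by omega)) hs2 (by simp) hne
    have aux : ∀ v u, Rch g n v u → v < n →
        (visitA g n (n-1) (n+2) (List.replicate (n+1) 0) s "sad").1.getD v 1 ≠ 0 →
        (visitA g n (n-1) (n+2) (List.replicate (n+1) 0) s "sad").1.getD u 1 ≠ 0 ∧ u < n := by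
      intro v u h
      induction h with
      | refl => exact fun hv hnw => ⟨hnw, hv⟩
      | step e h ih =>
        intro hv hnw
        have hni := hb _ _ hv hnw (wrep (by omega)) e.1 e.2.1 e.2.2
        exact ih e.2.1 hni
    have hnwt := (aux s (n-1) hr hs2 ha).1
    have hout := vOut g n (n-1) (n+2) (List.replicate (n+1) 0) s "sad" hs1 hs2 (n-1) (Or.inr rfl)
    have : (visitA g n (n-1) (n+2) (List.replicate (n+1) 0) s "sad").1.getD (n-1) 1 = 0 := by
      rw [List.getD_eq_getElem?_getD, hout, ← List.getD_eq_getElem?_getD]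
      exact wrep (by omega)
    exact hnwt this

-- outer loop equations and behaviour
theorem outerA_nil (g : List (List Int)) (n : Nat) (cl : List Int) (r : String) :
    outerA g n [] cl r = r := by rw [outerA]

theorem outerA_cons (g : List (List Int)) (n i : Nat) (rest : List Nat)
    (cl : List Int) (r : String) :
    outerA g n (i :: rest) cl r =
      if r = "happy" then r
      else
        outerA g n rest
          ((List.range' 1 (n-1)).foldl (fun cc j => cc.set j (0:Int))
            (if pvW g 0 i ≤ 1000 then visitA g n (n-1) (n+2) cl i r else (cl, r)).1)
          (if pvW g 0 i ≤ 1000 then visitA g n (n-1) (n+2) cl i r else (cl, r)).2 := by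
  rw [outerA]

theorem outer_happy (g : List (List Int)) (n : Nat) :
    ∀ is cl, outerA g n is cl "happy" = "happy" := by
  intro is cl
  cases is with
  | nil => rw [outerA_nil]
  | cons i rest => rw [outerA_cons, if_pos rfl]

theorem oResp (g : List (List Int)) (n : Nat) :
    ∀ is cl r, outerA g n is cl r = "happy" ∨ outerA g n is cl r = r := by
  intro is
  induction is with
  | nil => intro cl r; right; rw [outerA_nil]
  | cons i rest ih =>
    intro cl r
    by_cases hr : r = "happy"
    · right; rw [outerA_cons, if_pos hr]
    · rw [outerA_cons, if_neg hr]
      rcases ih ((List.range' 1 (n-1)).foldl (fun cc j => cc.set j (0:Int))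
          (if pvW g 0 i ≤ 1000 then visitA g n (n-1) (n+2) cl i r else (cl, r)).1)
          (if pvW g 0 i ≤ 1000 then visitA g n (n-1) (n+2) cl i r else (cl, r)).2 with h | h
      · left; exact h
      · have h2 : (if pvW g 0 i ≤ 1000 then visitA g n (n-1) (n+2) cl i r else (cl, r)).2 = "happy" ∨
            (if pvW g 0 i ≤ 1000 then visitA g n (n-1) (n+2) cl i r else (cl, r)).2 = r := by
          by_cases hw : pvW g 0 i ≤ 1000
          · rw [if_pos hw]; exact vResp g n (n-1) (n+2) cl i r
          · rw [if_neg hw]; right; rfl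
        rcases h2 with h2 | h2
        · left; rw [h, h2]
        · right; rw [h, h2]

-- the colour reset at the end of each outer iteration
theorem fSet : ∀ (is : List Nat) (cl : List Int) (j : Nat),
    ((is.foldl (fun cc k => cc.set k (0:Int)) cl))[j]? =
      if j ∈ is ∧ j < cl.length then some 0 else cl[j]? := by
  intro is
  induction is with
  | nil => intro cl j; simp
  | cons k ks ih =>
    intro cl j
    simp only [List.foldl_cons]
    rw [ih]
    by_cases hjk : j = k
    · subst hjk
      by_cases hl : j < cl.length
      · by_cases hmem : j ∈ ks
        · simp [hmem, hl]
        · simp [hmem, hl]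
      · rw [List.set_eq_of_length_le (by omega)]
        simp [hl]
    · rw [List.getElem?_set_ne (Ne.symm hjk), List.length_set]
      by_cases hmem : j ∈ ks
      · simp [hmem, hjk]
      · simp [hmem, hjk]

theorem reset_eq (n : Nat) : ∀ (cl : List Int), cl.length = n + 1 →
    (∀ j, ¬(1 ≤ j ∧ j < n) → cl[j]? = (List.replicate (n+1) (0:Int))[j]?) →
    (List.range' 1 (n-1)).foldl (fun cc k => cc.set k (0:Int)) cl =
      List.replicate (n+1) 0 := by
  intro cl hlen hout
  apply List.ext_getElem?
  intro j
  rw [fSet]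
  by_cases hmem : j ∈ List.range' 1 (n-1)
  · rw [List.mem_range'_1] at hmem
    rw [if_pos ⟨List.mem_range'_1.mpr hmem, by omega⟩]
    rw [List.getElem?_replicate, if_pos (by omega)]
  · have hj : ¬(1 ≤ j ∧ j < n) := by
      intro hc; exact hmem (List.mem_range'_1.mpr (by omega))
    rw [if_neg (by rw [List.mem_range'_1]; omega)]
    exact hout j hj

theorem outer_char (g : List (List Int)) (n : Nat) (hn2 : 2 ≤ n) :
    ∀ is, (∀ i ∈ is, 1 ≤ i ∧ i < n) →
      ((outerA g n is (List.replicate (n+1) 0) "sad" = "happy") ↔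
        ∃ s ∈ is, pvW g 0 s ≤ 1000 ∧ Rch g n s (n-1)) := by
  intro is
  induction is with
  | nil => intro _; rw [outerA_nil]; simp
  | cons i rest ih =>
    intro hb
    have hib := hb i (by simp)
    have hbr : ∀ i' ∈ rest, 1 ≤ i' ∧ i' < n := fun i' hi' => hb i' (by simp [hi'])
    rw [outerA_cons, if_neg (by simp)]
    by_cases hw0 : pvW g 0 i ≤ 1000
    · rw [if_pos hw0]
      by_cases hp : (visitA g n (n-1) (n+2) (List.replicate (n+1) 0) i "sad").2 = "happy"
      · have hr := (visit_top g n hn2 i hib.1 hib.2).mp hp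
        rw [hp, outer_happy]
        constructor
        · intro _; exact ⟨i, by simp, hw0, hr⟩
        · intro _; rfl
      · have hps : (visitA g n (n-1) (n+2) (List.replicate (n+1) 0) i "sad").2 = "sad" := by
          rcases vResp g n (n-1) (n+2) (List.replicate (n+1) 0) i "sad" with h | h
          · exact absurd h hp
          · exact h
        have hnr : ¬ Rch g n i (n-1) := fun hr => hp ((visit_top g n hn2 i hib.1 hib.2).mpr hr)
        have hrst : (List.range' 1 (n-1)).foldl (fun cc k => cc.set k (0:Int))
            (visitA g n (n-1) (n+2) (List.replicate (n+1) 0) i "sad").1 =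
            List.replicate (n+1) 0 := by
          apply reset_eq
          · rw [vLen]; simp
          · intro j hj
            exact vOut g n (n-1) (n+2) (List.replicate (n+1) 0) i "sad" hib.1 hib.2 j (Or.inl hj)
        rw [hps, hrst, ih hbr]
        constructor
        · intro ⟨s, hs, h1, h2⟩; exact ⟨s, by simp [hs], h1, h2⟩
        · intro ⟨s, hs, h1, h2⟩
          rcases List.mem_cons.mp hs with hs' | hs'
          · subst hs'; exact absurd h2 hnr
          · exact ⟨s, hs', h1, h2⟩
    · rw [if_neg hw0]
      have hrst : (List.range' 1 (n-1)).foldl (fun cc k => cc.set k (0:Int))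
          (List.replicate (n+1) (0:Int)) = List.replicate (n+1) 0 := by
        apply reset_eq
        · simp
        · intro j _; rfl
      rw [hrst, ih hbr]
      constructor
      · intro ⟨s, hs, h1, h2⟩; exact ⟨s, by simp [hs], h1, h2⟩
      · intro ⟨s, hs, h1, h2⟩
        rcases List.mem_cons.mp hs with hs' | hs'
        · subst hs'; exact absurd h1 hw0
        · exact ⟨s, hs', h1, h2⟩

-- the initial colour list built by append is all-white of length n+1
theorem colorInit_aux : ∀ (m : Nat) (acc : List Int),
    (List.range m).foldl (fun a _ => a ++ [(0:Int)]) acc = acc ++ List.replicate m 0 := by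
  intro m
  induction m with
  | zero => intro acc; simp
  | succ m ih =>
    intro acc
    rw [List.range_succ, List.foldl_append, ih]
    simp [List.replicate_succ']

theorem dfs_eq (g : List (List Int)) :
    dfs g = [outerA g g.length (List.range' 1 (g.length - 1))
      (List.replicate (g.length + 1) 0) "sad"] := by
  show [outerA g g.length (List.range' 1 (g.length - 1))
      (((List.range g.length).foldl (fun acc _ => acc ++ [(0:Int)]) []) ++ [(0:Int)]) "sad"] = _
  rw [colorInit_aux]
  simp [List.replicate_succ']

theorem A_char (g : List (List Int)) : dfs g = ["happy"] ↔ Happy g := by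
  rw [dfs_eq]
  by_cases hn2 : 2 ≤ g.length
  · rw [show ([outerA g g.length (List.range' 1 (g.length - 1))
      (List.replicate (g.length + 1) 0) "sad"] = (["happy"] : List String)) ↔
      (outerA g g.length (List.range' 1 (g.length - 1))
      (List.replicate (g.length + 1) 0) "sad" = "happy") from by simp]
    rw [outer_char g g.length hn2 _
      (fun i hi => by rw [List.mem_range'_1] at hi; omega)]
    constructor
    · intro ⟨s, hs, h1, h2⟩
      rw [List.mem_range'_1] at hs
      exact ⟨s, ⟨hs.1, by omega, h1⟩, h2⟩
    · intro ⟨s, ⟨h1, h2, h3⟩, h4⟩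
      exact ⟨s, List.mem_range'_1.mpr (by omega), h3, h4⟩
  · have hr : List.range' 1 (g.length - 1) = [] := by
      have : g.length - 1 = 0 := by omega
      rw [this]; rfl
    rw [hr, outerA_nil]
    constructor
    · intro h; simp at h
    · intro ⟨s, ⟨h1, h2, _⟩, _⟩; omega

theorem A_or (g : List (List Int)) : dfs g = ["happy"] ∨ dfs g = ["sad"] := by
  rw [dfs_eq]
  rcases oResp g g.length (List.range' 1 (g.length - 1))
      (List.replicate (g.length + 1) 0) "sad" with h | h
  · left; rw [h]
  · right; rw [h]

-- ===== B side =====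
def bStep (g : List (List Int)) (n : Nat) (s : PySem.Set Nat × PySem.Set Nat) :
    PySem.Set Nat × PySem.Set Nat :=
  (PySem.Set.union s.1 (stepB g n s.1 s.2), stepB g n s.1 s.2)

def SK (g : List (List Int)) (n k : Nat) : PySem.Set Nat × PySem.Set Nat :=
  (fun s => bStep g n s)^[k] (PySem.Set.ofList [0], PySem.Set.ofList [0])

theorem SK_zero (g : List (List Int)) (n : Nat) : SK g n 0 = ([0], [0]) := rfl

theorem SK_succ (g : List (List Int)) (n k : Nat) : SK g n (k+1) = bStep g n (SK g n k) := by
  unfold SK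
  rw [Function.iterate_succ_apply']

theorem frontier_stepB_empty (g : List (List Int)) (n : Nat) (R : PySem.Set Nat) :
    stepB g n R [] = [] := by
  unfold stepB
  have : (List.range' 1 (n-1)).filter
      (fun i => !(PySem.Set.contains R i) && ([] : List Nat).any (fun v => pvW g v i ≤ 1000))
      = [] := by
    apply List.filter_eq_nil_iff.mpr
    intro a _
    simp
  rw [this]
  rfl

theorem bStep_fix (g : List (List Int)) (n : Nat) (s : PySem.Set Nat × PySem.Set Nat)
    (h : s.2 = []) : bStep g n s = s := by
  unfold bStep
  rw [h, frontier_stepB_empty]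
  exact Prod.ext rfl h.symm

theorem bLoop_iter (g : List (List Int)) (n : Nat) :
    ∀ (k : Nat) (s : PySem.Set Nat × PySem.Set Nat),
      bLoop g n k s = (fun s => bStep g n s)^[k] s := by
  intro k
  induction k with
  | zero => intro s; rfl
  | succ k ih =>
    intro s
    show (if s.2 = [] then s else bLoop g n k (bStep g n s)) = _
    by_cases h : s.2 = []
    · rw [if_pos h, Function.iterate_fixed (bStep_fix g n s h)]
    · rw [if_neg h, ih, Function.iterate_succ_apply]

theorem dfs_alt_eq (g : List (List Int)) :
    dfs_alt g = [if (2 ≤ g.length ∧ (g.length - 1) ∈ (SK g g.length g.length).1)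
      then "happy" else "sad"] := by
  show [if (2 ≤ g.length ∧
      PySem.Set.contains (bLoop g g.length g.length
        (PySem.Set.ofList [0], PySem.Set.ofList [0])).1 (g.length - 1) = true)
      then "happy" else "sad"] = _
  rw [bLoop_iter]
  simp only [PySem.Set.contains_iff]
  rfl

theorem step_mem (g : List (List Int)) (n : Nat) (R F : PySem.Set Nat) (i : Nat) :
    i ∈ stepB g n R F ↔ ((1 ≤ i ∧ i < n) ∧ i ∉ R ∧ ∃ v ∈ F, pvW g v i ≤ 1000) := by
  unfold stepB
  rw [PySem.Set.mem_ofList, List.mem_filter]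
  simp only [Bool.and_eq_true, Bool.not_eq_true', List.any_eq_true, decide_eq_true_eq,
    List.mem_range'_1]
  constructor
  · intro ⟨h1, h2, h3⟩
    refine ⟨⟨h1.1, by omega⟩, ?_, h3⟩
    intro hmem
    rw [← PySem.Set.contains_iff] at hmem
    rw [hmem] at h2; exact Bool.noConfusion h2
  · intro ⟨⟨h1, h2⟩, h3, h4⟩
    refine ⟨⟨h1, by omega⟩, ?_, h4⟩
    cases hc : PySem.Set.contains R i with
    | false => rfl
    | true => exact absurd ((PySem.Set.contains_iff _ _).mp hc) h3

def InvB (g : List (List Int)) (n : Nat) (s : PySem.Set Nat × PySem.Set Nat) : Prop :=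
  0 ∈ s.1 ∧ (∀ v ∈ s.2, v ∈ s.1) ∧
  (∀ u ∈ s.1, u = 0 ∨ ∃ p, Edg g n 0 p ∧ Rch g n p u) ∧
  (∀ u ∈ s.1, u = 0 ∨ u < n) ∧
  (∀ v ∈ s.1, ∀ i, Edg g n v i → i ∈ s.1 ∨ v ∈ s.2) ∧
  s.1.Nodup

theorem inv_step (g : List (List Int)) (n : Nat) (s : PySem.Set Nat × PySem.Set Nat)
    (h : InvB g n s) : InvB g n (bStep g n s) := by
  obtain ⟨h1, h2, h3, h4, h5, h6⟩ := h
  refine ⟨(PySem.Set.mem_union _ _ _).mpr (Or.inl h1), ?_, ?_, ?_, ?_, PySem.Set.nodup_union _ _ h6⟩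
  · intro v hv; exact (PySem.Set.mem_union _ _ _).mpr (Or.inr hv)
  · intro u hu
    rcases (PySem.Set.mem_union _ _ _).mp hu with hu | hu
    · exact h3 u hu
    · obtain ⟨⟨hi1, hi2⟩, _, v, hvF, hwt⟩ := (step_mem g n s.1 s.2 u).mp hu
      rcases h3 v (h2 v hvF) with hv0 | ⟨p, he, hr⟩
      · subst hv0; exact Or.inr ⟨u, ⟨hi1, hi2, hwt⟩, Rch.refl u⟩
      · exact Or.inr ⟨p, he, rch_snoc hr ⟨hi1, hi2, hwt⟩⟩
  · intro u hu
    rcases (PySem.Set.mem_union _ _ _).mp hu with hu | hu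
    · exact h4 u hu
    · exact Or.inr ((step_mem g n s.1 s.2 u).mp hu).1.2
  · intro v hv i he
    rcases (PySem.Set.mem_union _ _ _).mp hv with hv | hv
    · rcases h5 v hv i he with hi | hvF
      · exact Or.inl ((PySem.Set.mem_union _ _ _).mpr (Or.inl hi))
      · by_cases hiR : i ∈ s.1
        · exact Or.inl ((PySem.Set.mem_union _ _ _).mpr (Or.inl hiR))
        · exact Or.inl ((PySem.Set.mem_union _ _ _).mpr (Or.inr
            ((step_mem g n s.1 s.2 i).mpr ⟨⟨he.1, he.2.1⟩, hiR, v, hvF, he.2.2⟩)))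
    · exact Or.inr hv

theorem inv_SK (g : List (List Int)) (n : Nat) : ∀ k, InvB g n (SK g n k) := by
  intro k
  induction k with
  | zero =>
    rw [SK_zero]
    refine ⟨by simp, by simp, ?_, by simp, ?_, by simp⟩
    · intro u hu; simp at hu; exact Or.inl hu
    · intro v hv i _; simp at hv; right; simp [hv]
  | succ k ih => rw [SK_succ]; exact inv_step g n (SK g n k) ih

theorem union_nil (R : PySem.Set Nat) : PySem.Set.union R [] = R := rfl

theorem bStep_empty (g : List (List Int)) (n : Nat) (s : PySem.Set Nat × PySem.Set Nat)
    (h : s.2 = []) : bStep g n s = (s.1, []) := by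
  unfold bStep
  rw [h, frontier_stepB_empty, union_nil]

theorem union_len_lt (R N : PySem.Set Nat) (x : Nat)
    (hxN : x ∈ N) (hxR : x ∉ R) : R.length < (PySem.Set.union R N).length := by
  have hu : PySem.Set.union R N = R ++ (PySem.Set.ofList N).filter
      (fun y => !(PySem.Set.contains R y)) := PySem.Set.update_eq_append_filter ..
  rw [hu, List.length_append]
  have hmem : x ∈ (PySem.Set.ofList N).filter (fun y => !(PySem.Set.contains R y)) := by
    rw [List.mem_filter]
    refine ⟨(PySem.Set.mem_ofList _ _).mpr hxN, ?_⟩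
    cases hc : PySem.Set.contains R x with
    | false => rfl
    | true => exact absurd ((PySem.Set.contains_iff _ _).mp hc) hxR
  have := List.length_pos_of_mem hmem
  omega

theorem dichotomy (g : List (List Int)) (n : Nat) :
    ∀ k, (SK g n k).2 = [] ∨ k + 1 ≤ (SK g n k).1.length := by
  intro k
  induction k with
  | zero => right; rw [SK_zero]; simp
  | succ k ih =>
    rcases ih with h | h
    · left; rw [SK_succ, bStep_empty g n _ h]
    · by_cases hN : stepB g n (SK g n k).1 (SK g n k).2 = []
      · left; rw [SK_succ]; exact hN
      · right
        obtain ⟨x, hx⟩ := List.exists_mem_of_ne_nil _ hN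
        have hxR : x ∉ (SK g n k).1 := ((step_mem g n _ _ x).mp hx).2.1
        have hlt := union_len_lt (SK g n k).1 _ x hx hxR
        rw [SK_succ]
        unfold bStep
        simp only []
        omega

theorem len_bound (g : List (List Int)) (n : Nat) (hn : 1 ≤ n)
    (s : PySem.Set Nat × PySem.Set Nat) (h : InvB g n s) : s.1.length ≤ n := by
  obtain ⟨_, _, _, h4, _, h6⟩ := h
  have hc : s.1.toFinset.card = s.1.length := List.toFinset_card_of_nodup h6
  have hsub : s.1.toFinset ⊆ Finset.range n := by
    intro x hx
    rw [Finset.mem_range]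
    rcases h4 x (List.mem_toFinset.mp hx) with h | h
    · omega
    · exact h
  have := Finset.card_le_card hsub
  rw [Finset.card_range] at this
  omega

theorem closed_final (g : List (List Int)) (n : Nat) :
    ∀ v ∈ (SK g n n).1, ∀ i, Edg g n v i → i ∈ (SK g n n).1 := by
  by_cases hn : 1 ≤ n
  · have hfr : (SK g n n).2 = [] := by
      rcases dichotomy g n n with h | h
      · exact h
      · have := len_bound g n hn (SK g n n) (inv_SK g n n)
        omega
    intro v hv i he
    rcases (inv_SK g n n).2.2.2.2.1 v hv i he with h | h
    · exact h
    · rw [hfr] at h; simp at h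
  · intro v _ i he
    have := he.2.1
    omega

theorem B_char (g : List (List Int)) : dfs_alt g = ["happy"] ↔ Happy g := by
  rw [dfs_alt_eq]
  by_cases hC : (2 ≤ g.length ∧ (g.length - 1) ∈ (SK g g.length g.length).1)
  · rw [if_pos hC]
    constructor
    · intro _
      obtain ⟨hn2, hmem⟩ := hC
      rcases (inv_SK g g.length g.length).2.2.1 _ hmem with h0 | ⟨p, he, hr⟩
      · omega
      · exact ⟨p, he, hr⟩
    · intro _; rfl
  · rw [if_neg hC]
    constructor
    · intro h; simp at h
    · intro ⟨s, he, hr⟩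
      exfalso
      apply hC
      have hn2 : 2 ≤ g.length := by have := he.1; have := he.2.1; omega
      refine ⟨hn2, ?_⟩
      have hs : s ∈ (SK g g.length g.length).1 :=
        (closed_final g g.length 0 (inv_SK g g.length g.length).1 s he)
      have aux : ∀ v u, Rch g g.length v u → v ∈ (SK g g.length g.length).1 →
          u ∈ (SK g g.length g.length).1 := by
        intro v u h
        induction h with
        | refl => exact fun hv => hv
        | step e _ ih => exact fun hv => ih (closed_final g g.length _ hv _ e)
      exact aux s (g.length - 1) hr hs

theorem B_or (g : List (List Int)) : dfs_alt g = ["happy"] ∨ dfs_alt g = ["sad"] := by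
  rw [dfs_alt_eq]
  by_cases hC : (2 ≤ g.length ∧ (g.length - 1) ∈ (SK g g.length g.length).1)
  · left; rw [if_pos hC]
  · right; rw [if_neg hC]

-- ===== VERDICT (by name: the statement is the Claim_ definition above) =====
theorem dfs_spec : Claim_equal_dfs := by
  unfold Claim_equal_dfs
  intro g _ _
  unfold Spec_dfs
  by_cases h : Happy g
  · rw [(A_char g).mpr h, (B_char g).mpr h]
  · have ha : dfs g = ["sad"] := (A_or g).resolve_left (fun hh => h ((A_char g).mp hh))
    have hb : dfs_alt g = ["sad"] := (B_or g).resolve_left (fun hh => h ((B_char g).mp hh))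
    rw [ha, hb]
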